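-- pv_equiv track=rewrite | github.com/shyampatadia/hacknation-ai-hackathon | src/graph/enricher.py | group_by_content
-- ===== SOURCE A (Python) =====
-- def group_by_content(data):
--     from collections import defaultdict
--
--     content_map = defaultdict(list)
--
--     for item in data:
--         event_id = item.get("event__id", "")
--         text = item.get("content__body", "")
--
--         if "_chunk" in event_id:
--             base_id, chunk = event_id.split("_chunk")
--             chunk_num = int(chunk)
--         else:
--             base_id = event_id
--             chunk_num = 0
--
--         content_map[base_id].append((chunk_num, text))
--
--     final_content = {}
--     for cid, chunks in content_map.items():
--         chunks_sorted = sorted(chunks, key=lambda x: x[0])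
--         full_text = "\n".join([c[1] for c in chunks_sorted])
--         final_content[cid] = full_text
--
--     return final_content
-- ===== SOURCE B (Python) =====
-- def group_by_content(data):
--     # Partition approach: parse once into flat (base_id, chunk_num, text) rows,
--     # then repeatedly peel off the first base id with its whole group.
--     rows = []
--     for item in data:
--         event_id = item.get("event__id", "")
--         text = item.get("content__body", "")
--         if "_chunk" in event_id:
--             base_id, chunk = event_id.split("_chunk")
--             rows.append((base_id, int(chunk), text))
--         else:
--             rows.append((event_id, 0, text))
--     result = {}
--     while rows:
--         base = rows[0][0]
--         group = sorted(((n, t) for b, n, t in rows if b == base), key=lambda x: x[0])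
--         result[base] = "\n".join(t for _, t in group)
--         rows = [r for r in rows if r[0] != base]
--     return result
-- ===== Notes on version B (the rewrite author's own statement) =====
-- stated objective: alternative
-- what changed: B first flattens the input into a parsed (base_id, chunk_num, text) row list, then repeatedly peels off the first remaining base id with a filter, sorting and joining that one group, instead of A's defaultdict accumulation followed by a second per-key sort-and-join loop.
import Mathlib
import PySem

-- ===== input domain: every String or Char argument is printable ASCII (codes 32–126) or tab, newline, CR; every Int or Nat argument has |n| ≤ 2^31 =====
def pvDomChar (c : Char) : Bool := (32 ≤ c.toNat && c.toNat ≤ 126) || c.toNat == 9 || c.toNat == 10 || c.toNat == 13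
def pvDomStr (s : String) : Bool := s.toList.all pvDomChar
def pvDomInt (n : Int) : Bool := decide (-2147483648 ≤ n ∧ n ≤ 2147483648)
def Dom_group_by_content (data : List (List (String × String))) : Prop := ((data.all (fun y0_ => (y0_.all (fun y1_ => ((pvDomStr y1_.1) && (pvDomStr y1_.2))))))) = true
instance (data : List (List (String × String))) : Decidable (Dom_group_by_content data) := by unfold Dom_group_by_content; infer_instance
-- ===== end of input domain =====

-- B parses once into a flat row list, then peels off one base-id group at a time by
-- filtering (sort+join per peeled group) — a partition decomposition, not A's dict fold.


-- ===== PORT A =====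
def group_by_content (data : List (List (String × String))) : List (String × String) :=
  let content_map : PySem.Dict String (List (Int × String)) :=
    data.foldl (fun cm item =>
      let event_id := (PySem.Dict.mk item).getD "event__id" ""
      let text := (PySem.Dict.mk item).getD "content__body" ""
      let bc : String × Int :=
        if PySem.Str.isIn "_chunk" event_id then
          let parts := (PySem.Str.split? event_id "_chunk").getD []
          (parts[0]?.getD "", (PySem.Int.ofStr? (parts[1]?.getD "")).getD 0)
        else (event_id, 0)
      cm.modify bc.1 [] (fun lst => lst ++ [(bc.2, text)]))
      PySem.Dict.empty
  let final_content : PySem.Dict String String :=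
    content_map.items.foldl (fun fc p =>
      let chunks_sorted := PySem.List.sorted p.2 (fun x => x.1)
      let full_text := PySem.Str.join "\n" (chunks_sorted.map (fun c => c.2))
      fc.insert p.1 full_text) PySem.Dict.empty
  final_content.items

-- ===== PORT B =====
-- pass 1 of Source B: the flat parsed row list (base_id, chunk_num, text)
def pvParseRows (data : List (List (String × String))) : List (String × Int × String) :=
  data.foldl (fun rows item =>
    let event_id := (PySem.Dict.mk item).getD "event__id" ""
    let text := (PySem.Dict.mk item).getD "content__body" ""
    if PySem.Str.isIn "_chunk" event_id then
      let parts := (PySem.Str.split? event_id "_chunk").getD []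
      rows ++ [(parts[0]?.getD "", (PySem.Int.ofStr? (parts[1]?.getD "")).getD 0, text)]
    else rows ++ [(event_id, 0, text)]) []

-- Source B's while loop: peel off the first base id with its whole (sorted, joined) group
def pvGroupLoop (rows : List (String × Int × String)) (result : PySem.Dict String String) :
    List (String × String) :=
  match rows with
  | [] => result.items
  | r :: rest =>
    let base := r.1
    let grp := PySem.List.sorted (((r :: rest).filter (fun x => x.1 == base)).map (fun x => x.2))
      (fun x => x.1)
    pvGroupLoop ((r :: rest).filter (fun x => !(x.1 == base)))
      (result.insert base (PySem.Str.join "\n" (grp.map (fun c => c.2))))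
termination_by rows.length
decreasing_by
  simp only [List.filter_cons, beq_self_eq_true, Bool.not_true, List.length_cons]
  exact Nat.lt_succ_of_le (List.length_filter_le _ _)

def group_by_content_alt (data : List (List (String × String))) : List (String × String) :=
  pvGroupLoop (pvParseRows data) PySem.Dict.empty

-- ===== PRECONDITION & SPEC =====
-- Pre_ excludes exactly the inputs where Python A raises: an event id containing
-- "_chunk" more than once (unpacking 'base_id, chunk = …split(…)' raises ValueError)
-- or whose suffix after "_chunk" is not a valid int literal (int() raises ValueError).
def Pre_group_by_content (data : List (List (String × String))) : Prop :=
  ∀ item ∈ data,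
    PySem.Str.isIn "_chunk" ((PySem.Dict.mk item).getD "event__id" "") = true →
      ((PySem.Str.split? ((PySem.Dict.mk item).getD "event__id" "") "_chunk").getD []).length = 2 ∧
      (PySem.Int.ofStr? ((((PySem.Str.split? ((PySem.Dict.mk item).getD "event__id" "") "_chunk").getD [])[1]?).getD "")).isSome = true
instance (data : List (List (String × String))) : Decidable (Pre_group_by_content data) := by unfold Pre_group_by_content; infer_instance

def pvWitness_group_by_content : (List (List (String × String))) :=
  [[("event__id", "e_chunk1"), ("content__body", "b")],
   [("event__id", "e_chunk0"), ("content__body", "a")],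
   [("event__id", "f"), ("content__body", "c")]]

def Spec_group_by_content (data : List (List (String × String))) (out : List (String × String)) : Prop := out = group_by_content_alt data
instance (data : List (List (String × String))) (out : List (String × String)) : Decidable (Spec_group_by_content data out) := by unfold Spec_group_by_content; infer_instance

-- ===== CLAIM (what is proved, stated in full; the proofs are below) =====
def Claim_equal_group_by_content : Prop := ∀ (data : List (List (String × String))), Dom_group_by_content data → Pre_group_by_content data → Spec_group_by_content data (group_by_content data)

-- ===== LEMMAS AND PROOFS =====

-- the common parse of one item, and the per-row dict step of A's first loop
def pvParse (item : List (String × String)) : String × Int × String :=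
  let event_id := (PySem.Dict.mk item).getD "event__id" ""
  let text := (PySem.Dict.mk item).getD "content__body" ""
  if PySem.Str.isIn "_chunk" event_id then
    let parts := (PySem.Str.split? event_id "_chunk").getD []
    (parts[0]?.getD "", (PySem.Int.ofStr? (parts[1]?.getD "")).getD 0, text)
  else (event_id, 0, text)

def pvStepRow (cm : PySem.Dict String (List (Int × String))) (r : String × Int × String) :
    PySem.Dict String (List (Int × String)) :=
  cm.modify r.1 [] (fun lst => lst ++ [r.2])

-- the abstract recursive partition both ports compute
def pvGroupRec : List (String × Int × String) → List (String × List (Int × String))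
  | [] => []
  | r :: rest =>
    (r.1, r.2 :: (rest.filter (fun x => x.1 == r.1)).map (fun x => x.2)) ::
      pvGroupRec (rest.filter (fun x => !(x.1 == r.1)))
termination_by rows => rows.length
decreasing_by
  have h := List.length_filter_le (fun (x : {x // x ∈ rest}) => !x.val.1 == r.1) rest.attach
  simp at h ⊢
  omega

def pvJoin (p : String × List (Int × String)) : String × String :=
  (p.1, PySem.Str.join "\n" ((PySem.List.sorted p.2 (fun x => x.1)).map (fun c => c.2)))

theorem pvParseRows_eq_map (data : List (List (String × String))) :
    pvParseRows data = data.map pvParse := by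
  have h : ∀ (acc : List (String × Int × String)),
      data.foldl (fun rows item =>
        let event_id := (PySem.Dict.mk item).getD "event__id" ""
        let text := (PySem.Dict.mk item).getD "content__body" ""
        if PySem.Str.isIn "_chunk" event_id then
          let parts := (PySem.Str.split? event_id "_chunk").getD []
          rows ++ [(parts[0]?.getD "", (PySem.Int.ofStr? (parts[1]?.getD "")).getD 0, text)]
        else rows ++ [(event_id, 0, text)]) acc = acc ++ data.map pvParse := by
    induction data with
    | nil => intro acc; simp
    | cons item rest ih =>
      intro acc
      simp only [List.foldl_cons, List.map_cons, ih]
      simp only [pvParse]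
      split
      next => simp
      next => simp
  simpa using h []

theorem pvFoldA_eq_foldRow (data : List (List (String × String)))
    (d : PySem.Dict String (List (Int × String))) :
    data.foldl (fun cm item =>
      let event_id := (PySem.Dict.mk item).getD "event__id" ""
      let text := (PySem.Dict.mk item).getD "content__body" ""
      let bc : String × Int :=
        if PySem.Str.isIn "_chunk" event_id then
          let parts := (PySem.Str.split? event_id "_chunk").getD []
          (parts[0]?.getD "", (PySem.Int.ofStr? (parts[1]?.getD "")).getD 0)
        else (event_id, 0)
      cm.modify bc.1 [] (fun lst => lst ++ [(bc.2, text)])) d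
      = (data.map pvParse).foldl pvStepRow d := by
  rw [List.foldl_map]
  have hstep : (fun (cm : PySem.Dict String (List (Int × String))) (item : List (String × String)) =>
      let event_id := (PySem.Dict.mk item).getD "event__id" ""
      let text := (PySem.Dict.mk item).getD "content__body" ""
      let bc : String × Int :=
        if PySem.Str.isIn "_chunk" event_id then
          let parts := (PySem.Str.split? event_id "_chunk").getD []
          (parts[0]?.getD "", (PySem.Int.ofStr? (parts[1]?.getD "")).getD 0)
        else (event_id, 0)
      cm.modify bc.1 [] (fun lst => lst ++ [(bc.2, text)]))
      = fun cm item => pvStepRow cm (pvParse item) := by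
    funext cm item
    simp only [pvParse, pvStepRow]
    split
    next => rfl
    next => rfl
  rw [hstep]

-- A's first loop characterised: its items are the recursive partition of the rows
theorem pvFold_items (rows : List (String × Int × String))
    (d : PySem.Dict String (List (Int × String))) (hnd : d.keys.Nodup) :
    (rows.foldl pvStepRow d).items
      = d.items.map (fun p => (p.1, p.2 ++ (rows.filter (fun r => r.1 == p.1)).map (fun r => r.2)))
        ++ pvGroupRec (rows.filter (fun r => !(d.contains r.1))) := by
  induction rows generalizing d with
  | nil => simp [pvGroupRec]
  | cons r rs ih =>
    simp only [List.foldl_cons]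
    have hnd' : (pvStepRow d r).keys.Nodup := by
      simp only [pvStepRow, PySem.Dict.modify]
      exact PySem.Dict.nodup_keys_insert _ _ _ hnd
    rw [ih _ hnd']
    have hcontains' : ∀ x : String,
        (pvStepRow d r).contains x = (x == r.1 || d.contains x) := by
      intro x
      simp only [pvStepRow, PySem.Dict.modify]
      exact PySem.Dict.contains_insert _ _ _ _
    by_cases hc : d.contains r.1 = true
    · have hitems : (pvStepRow d r).items
          = d.items.map (fun p => if (p.1 == r.1) = true then (r.1, d.getD r.1 [] ++ [r.2]) else p) := by
        simp only [pvStepRow, PySem.Dict.modify]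
        exact PySem.Dict.items_insert_of_contains _ _ hc
      rw [hitems, List.map_map]
      simp only [List.filter_cons, hc, Bool.not_true, Bool.false_eq_true, if_false]
      congr 1
      · apply List.map_congr_left
        intro p hp
        by_cases hp1 : (p.1 == r.1) = true
        · have hpe : p.1 = r.1 := by simpa using hp1
          have hget : d.getD r.1 [] = p.2 := by
            have hg := PySem.Dict.get?_of_mem_items d (k := p.1) (v := p.2) (by simpa using hp) hnd
            rw [hpe] at hg
            simp [PySem.Dict.getD, hg]
          simp [Function.comp, hget, hpe]
        · have hr1 : (r.1 == p.1) = false := by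
            simp only [beq_eq_false_iff_ne, ne_eq]
            intro h
            exact hp1 (by simp [h])
          simp [Function.comp, hp1, hr1]
      · congr 1
        apply List.filter_congr
        intro x _
        rw [hcontains']
        by_cases hx1 : (x.1 == r.1) = true
        · have hxe : x.1 = r.1 := by simpa using hx1
          simp [hxe, hc]
        · simp [hx1]
    · have hcf : d.contains r.1 = false := by simpa using hc
      have hnone : d.get? r.1 = none := (PySem.Dict.get?_eq_none_iff_contains d r.1).mpr hcf
      have hitems : (pvStepRow d r).items = d.items ++ [(r.1, [r.2])] := by
        simp only [pvStepRow, PySem.Dict.modify]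
        rw [PySem.Dict.items_insert_of_not_contains _ _ hcf]
        simp [PySem.Dict.getD, hnone]
      have hne : ∀ p ∈ d.items, (p.1 == r.1) = false ∧ (r.1 == p.1) = false := by
        intro p hp
        have hany : d.items.any (fun q => q.1 == r.1) = false := by
          simpa [PySem.Dict.contains] using hcf
        rw [List.any_eq_false] at hany
        have h1 : p.1 ≠ r.1 := by simpa using hany p hp
        exact ⟨by simpa using h1, by simpa using Ne.symm h1⟩
      rw [hitems, List.map_append]
      simp only [List.filter_cons, hcf, Bool.not_false, if_true]
      rw [pvGroupRec, List.append_assoc]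
      have hY : (rs.filter (fun x => !(d.contains x.1))).filter (fun x => x.1 == r.1)
          = rs.filter (fun x => x.1 == r.1) := by
        rw [List.filter_filter]
        apply List.filter_congr
        intro x _
        by_cases hx1 : (x.1 == r.1) = true
        · have hxe : x.1 = r.1 := by simpa using hx1
          simp [hxe, hcf]
        · simp [hx1]
      have hZ : rs.filter (fun x => !((pvStepRow d r).contains x.1))
          = (rs.filter (fun x => !(d.contains x.1))).filter (fun x => !(x.1 == r.1)) := by
        rw [List.filter_filter]
        apply List.filter_congr
        intro x _
        rw [hcontains']
        by_cases hx1 : (x.1 == r.1) = true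
        · simp [hx1]
        · simp [hx1]
      rw [hY, hZ]
      congr 1
      · apply List.map_congr_left
        intro p hp
        simp [(hne p hp).2]

-- A's second loop: folding insert over items with nodup keys just maps
theorem pvFoldl_insert_items (g : String × List (Int × String) → String) :
    ∀ (L : List (String × List (Int × String))) (fc : PySem.Dict String String),
      (∀ p ∈ L, fc.contains p.1 = false) → (L.map (fun p => p.1)).Nodup →
      (L.foldl (fun fc p => fc.insert p.1 (g p)) fc).items
        = fc.items ++ L.map (fun p => (p.1, g p)) := by
  intro L
  induction L with
  | nil => intro fc _ _; simp
  | cons p rest ih =>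
    intro fc hfc hnd
    simp only [List.foldl_cons]
    have hpc : fc.contains p.1 = false := hfc p (by simp)
    have hrest : ∀ q ∈ rest, (fc.insert p.1 (g p)).contains q.1 = false := by
      intro q hq
      rw [PySem.Dict.contains_insert]
      have hne : q.1 ≠ p.1 := by
        simp only [List.map_cons, List.nodup_cons] at hnd
        intro he
        exact hnd.1 (he ▸ List.mem_map.mpr ⟨q, hq, rfl⟩)
      simp [hne, hfc q (by simp [hq])]
    rw [ih _ hrest (by simp only [List.map_cons, List.nodup_cons] at hnd; exact hnd.2),
        PySem.Dict.items_insert_of_not_contains _ _ hpc]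
    simp

theorem pvNodup_keys_foldRow (rows : List (String × Int × String))
    (d : PySem.Dict String (List (Int × String))) (h : d.keys.Nodup) :
    (rows.foldl pvStepRow d).keys.Nodup := by
  induction rows generalizing d with
  | nil => exact h
  | cons r rest ih =>
    refine ih _ ?_
    simp only [pvStepRow, PySem.Dict.modify]
    exact PySem.Dict.nodup_keys_insert _ _ _ h

-- B's loop in terms of the partition
theorem pvGroupLoop_eq_aux (n : Nat) : ∀ (rows : List (String × Int × String)), rows.length ≤ n →
    ∀ (res : PySem.Dict String String), (∀ r ∈ rows, res.contains r.1 = false) →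
      pvGroupLoop rows res = res.items ++ (pvGroupRec rows).map pvJoin := by
  induction n with
  | zero =>
    intro rows hlen
    cases rows with
    | nil => intro res _; simp [pvGroupLoop, pvGroupRec]
    | cons r rest => simp at hlen
  | succ n ihn =>
    intro rows hlen
    cases rows with
    | nil => intro res _; simp [pvGroupLoop, pvGroupRec]
    | cons r rest =>
      intro res hres
      rw [pvGroupLoop, pvGroupRec]
      simp only [List.filter_cons, beq_self_eq_true, Bool.not_true, Bool.false_eq_true, if_true, if_false, List.map_cons]
      have hres' : ∀ q ∈ rest.filter (fun x => !(x.1 == r.1)),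
          (res.insert r.1 (PySem.Str.join "\n"
            ((PySem.List.sorted (r.2 :: (rest.filter (fun x => x.1 == r.1)).map (fun x => x.2))
              (fun x => x.1)).map (fun c => c.2)))).contains q.1 = false := by
        intro q hq
        rw [PySem.Dict.contains_insert]
        have hmem := List.mem_filter.mp hq
        have hne : (q.1 == r.1) = false := by
          have := hmem.2
          simp only [Bool.not_eq_true'] at this
          exact this
        simp [hne, hres q (List.mem_cons_of_mem _ hmem.1)]
      have hlen' : (rest.filter (fun x => !(x.1 == r.1))).length ≤ n := by
        have := List.length_filter_le (fun x => !(x.1 == r.1)) rest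
        simp only [List.length_cons] at hlen
        omega
      rw [ihn _ hlen' _ hres',
        PySem.Dict.items_insert_of_not_contains _ _ (hres r List.mem_cons_self)]
      simp [pvJoin, List.append_assoc]

theorem pvGroupLoop_eq (rows : List (String × Int × String)) (res : PySem.Dict String String)
    (h : ∀ r ∈ rows, res.contains r.1 = false) :
    pvGroupLoop rows res = res.items ++ (pvGroupRec rows).map pvJoin :=
  pvGroupLoop_eq_aux rows.length rows le_rfl res h

-- ===== VERDICT (by name: the statement is the Claim_ definition above) =====
theorem group_by_content_spec : Claim_equal_group_by_content := by
  intro data _ _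
  unfold Spec_group_by_content
  simp only [group_by_content, group_by_content_alt]
  rw [pvFoldA_eq_foldRow, pvParseRows_eq_map]
  set rows := data.map pvParse with hrows
  have hnd : (((rows.foldl pvStepRow PySem.Dict.empty).items).map (fun p => p.1)).Nodup := by
    have := pvNodup_keys_foldRow rows PySem.Dict.empty PySem.Dict.nodup_keys_empty
    simpa [PySem.Dict.keys] using this
  rw [pvFoldl_insert_items
      (fun p => PySem.Str.join "\n" ((PySem.List.sorted p.2 (fun x => x.1)).map (fun c => c.2)))
      _ _ (fun p _ => rfl) hnd]
  rw [pvGroupLoop_eq rows PySem.Dict.empty (fun r _ => rfl)]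
  rw [pvFold_items rows PySem.Dict.empty PySem.Dict.nodup_keys_empty]
  have hfilter : rows.filter (fun r => !((PySem.Dict.empty : PySem.Dict String (List (Int × String))).contains r.1)) = rows := by
    apply List.filter_eq_self.mpr
    intro x _
    rfl
  rw [hfilter]
  rfl
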